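-- pv_equiv track=rewrite | github.com/XAIBOAI/XAIBOAI | AI-fortnite-streamer-bot/detections.py | analyze_storm_shrinking
-- ===== SOURCE A (Python) =====
-- def analyze_storm_shrinking(shrinking_timestamps: list) -> list:
--     """
--     Analyze the detected storm shrinking timestamps and filter out isolated false positives.
--     If timestamps occur in sequence (e.g., 173, 174, 175, ...), we consider it valid shrinking.
--     """
--     if not shrinking_timestamps:
--         return []
--
--     valid_storm_timestamps = []
--     sequence_start = None  # Variable to hold the start of a valid sequence
--
--     for i in range(1, len(shrinking_timestamps)):
--         if shrinking_timestamps[i] == shrinking_timestamps[i - 1] + 1: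
--             if sequence_start is None:
--                 sequence_start = shrinking_timestamps[i - 1]  # Mark the start of a valid sequence
--
--         else:
--             # If the sequence breaks and we had a valid sequence
--             if sequence_start is not None:
--                 # Calculate when to mark "storm shrinking" (5 seconds after sequence starts)
--                 storm_shrink_start = sequence_start + 5
--                 valid_storm_timestamps.append(storm_shrink_start)
--                 sequence_start = None  # Reset sequence_start for the next sequence
--
--     # Handle the case where the last sequence reaches the end of the timestamps
--     if sequence_start is not None:
--         storm_shrink_start = sequence_start + 5
--         valid_storm_timestamps.append(storm_shrink_start)
--
--     return valid_storm_timestamps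
-- ===== SOURCE B (Python) =====
-- def analyze_storm_shrinking(shrinking_timestamps: list) -> list:
--     """Group the timestamps into maximal runs of consecutive (+1) values,
--     then emit run[0] + 5 for every run of length >= 2."""
--     runs = []
--     current = []
--     for x in shrinking_timestamps:
--         if current and x == current[-1] + 1:
--             current.append(x)
--         else:
--             if current:
--                 runs.append(current)
--             current = [x]
--     if current:
--         runs.append(current)
--     return [run[0] + 5 for run in runs if len(run) >= 2]
-- ===== Notes on version B (the rewrite author's own statement) =====
-- stated objective: alternative
-- what changed: Replaces the stateful single scan with sequence_start bookkeeping by a group-first/map-second decomposition: partition the list into maximal runs of consecutive (+1) timestamps, then emit the first element of each run plus 5 for every run of length at least 2.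
import Mathlib
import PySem

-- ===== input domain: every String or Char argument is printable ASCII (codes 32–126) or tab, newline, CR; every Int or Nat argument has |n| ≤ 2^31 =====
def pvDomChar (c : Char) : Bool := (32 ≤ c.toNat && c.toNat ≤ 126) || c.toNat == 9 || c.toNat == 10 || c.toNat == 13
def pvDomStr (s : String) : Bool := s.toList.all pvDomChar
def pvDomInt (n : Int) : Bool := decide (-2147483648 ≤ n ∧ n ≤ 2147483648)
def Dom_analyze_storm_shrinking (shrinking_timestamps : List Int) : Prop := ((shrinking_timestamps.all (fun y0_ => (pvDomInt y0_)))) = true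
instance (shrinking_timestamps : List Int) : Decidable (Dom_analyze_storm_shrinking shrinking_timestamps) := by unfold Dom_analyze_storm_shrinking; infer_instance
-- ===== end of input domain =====

-- B replaces A's stateful sequence_start scan by a group-into-runs decomposition (same O(n) cost); proved equal on all inputs.


-- ===== PORT A =====
-- loop body of A's 'for i in range(1, len(..))': state = (valid_storm_timestamps, sequence_start)
def pvStepA (l : List Int) (st : List Int × Option Int) (i : Int) : List Int × Option Int :=
  if PySem.List.pyGetD l i 0 = PySem.List.pyGetD l (i - 1) 0 + 1 then
    match st.2 with
    | none => (st.1, some (PySem.List.pyGetD l (i - 1) 0))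
    | some _ => st
  else
    match st.2 with
    | some s => (st.1 ++ [s + 5], none)
    | none => st

def analyze_storm_shrinking (shrinking_timestamps : List Int) : List Int :=
  if shrinking_timestamps = [] then []
  else
    let st := (PySem.List.pyRange 1 (shrinking_timestamps.length : Int) 1).foldl
                (pvStepA shrinking_timestamps) ([], none)
    match st.2 with
    | some s => st.1 ++ [s + 5]
    | none => st.1

-- ===== PORT B =====
-- loop body of B's 'for x in shrinking_timestamps': state = (runs, current); current[-1] via getLast?
def pvStepB (st : List (List Int) × List Int) (x : Int) : List (List Int) × List Int :=
  match st.2.getLast? with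
  | some last =>
      if x = last + 1 then (st.1, st.2 ++ [x])
      else (st.1 ++ [st.2], [x])
  | none => (st.1, [x])

def analyze_storm_shrinking_alt (shrinking_timestamps : List Int) : List Int :=
  let st := shrinking_timestamps.foldl pvStepB ([], [])
  let runs := if st.2 = [] then st.1 else st.1 ++ [st.2]
  (runs.filter (fun r => 2 ≤ r.length)).map (fun r => r.headD 0 + 5)

-- ===== PRECONDITION & SPEC =====
def Spec_analyze_storm_shrinking (shrinking_timestamps : List Int) (out : List Int) : Prop := out = analyze_storm_shrinking_alt shrinking_timestamps
instance (shrinking_timestamps : List Int) (out : List Int) : Decidable (Spec_analyze_storm_shrinking shrinking_timestamps out) := by unfold Spec_analyze_storm_shrinking; infer_instance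

-- ===== CLAIM (what is proved, stated in full; the proofs are below) =====
def Claim_equal_analyze_storm_shrinking : Prop := ∀ (shrinking_timestamps : List Int), Dom_analyze_storm_shrinking shrinking_timestamps → Spec_analyze_storm_shrinking shrinking_timestamps (analyze_storm_shrinking shrinking_timestamps)

-- ===== LEMMAS AND PROOFS =====

-- structural form of A's index loop: recursion on the suffix with the previous element
def pvFrec : Int → (List Int × Option Int) → List Int → List Int × Option Int
  | _, st, [] => st
  | prev, st, x :: xs =>
      pvFrec x
        (if x = prev + 1 then
          (match st.2 with
           | none => (st.1, some prev)
           | some _ => st)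
         else
          (match st.2 with
           | some s => (st.1 ++ [s + 5], none)
           | none => st)) xs

-- common reference: prev = last element so far, h = head of current run, big = (run length ≥ 2)
def pvSrec : Int → Int → Bool → List Int → List Int
  | _, h, big, [] => if big then [h + 5] else []
  | prev, h, big, x :: xs =>
      if x = prev + 1 then pvSrec x (if big then h else prev) true xs
      else (if big then [h + 5] else []) ++ pvSrec x x false xs

def pvFinA (st : List Int × Option Int) : List Int :=
  match st.2 with
  | some s => st.1 ++ [s + 5]
  | none => st.1

def pvOutB (st : List (List Int) × List Int) : List Int :=
  ((if st.2 = [] then st.1 else st.1 ++ [st.2]).filter (fun r => 2 ≤ r.length)).map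
    (fun r => r.headD 0 + 5)

lemma pv_idx_fold (l : List Int) :
    ∀ (rest pref : List Int) (prev : Int) (st : List Int × Option Int),
      l = pref ++ prev :: rest →
      (PySem.List.pyRange ((pref.length : Int) + 1) (l.length : Int) 1).foldl (pvStepA l) st
        = pvFrec prev st rest := by
  intro rest
  induction rest with
  | nil =>
      intro pref prev st hl
      subst hl
      rw [PySem.List.pyRange_one_eq_nil (by simp)]
      rfl
  | cons x xs ih =>
      intro pref prev st hl
      have hlen : (l.length : Int) = (pref.length : Int) + 2 + xs.length := by
        subst hl; simp; ring
      rw [PySem.List.pyRange_one_cons (by rw [hlen]; omega)]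
      rw [List.foldl_cons]
      have hgetx : PySem.List.pyGetD l ((pref.length : Int) + 1) 0 = x := by
        have : ((pref.length : Int) + 1) = ((pref.length + 1 : Nat) : Int) := by omega
        rw [this, PySem.List.pyGetD_natCast, hl]
        rw [List.getD_eq_getElem?_getD]
        rw [List.getElem?_append_right (by omega)]
        simp
      have hgetp : PySem.List.pyGetD l ((pref.length : Int) + 1 - 1) 0 = prev := by
        have : ((pref.length : Int) + 1 - 1) = ((pref.length : Nat) : Int) := by omega
        rw [this, PySem.List.pyGetD_natCast, hl]
        rw [List.getD_eq_getElem?_getD]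
        rw [List.getElem?_append_right (by omega)]
        simp
      have hstep : pvStepA l st ((pref.length : Int) + 1)
          = (if x = prev + 1 then
              (match st.2 with
               | none => (st.1, some prev)
               | some _ => st)
             else
              (match st.2 with
               | some s => (st.1 ++ [s + 5], none)
               | none => st)) := by
        unfold pvStepA
        rw [hgetx, hgetp]
      rw [hstep]
      have hl' : l = (pref ++ [prev]) ++ x :: xs := by simp [hl]
      have hcast : ((pref ++ [prev]).length : Int) + 1 = ((pref.length : Int) + 1) + 1 := by
        simp
      generalize hst' : (if x = prev + 1 then
              (match st.2 with
               | none => (st.1, some prev)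
               | some _ => st)
             else
              (match st.2 with
               | some s => (st.1 ++ [s + 5], none)
               | none => st)) = st'
      have := ih (pref ++ [prev]) x st' hl'
      rw [hcast] at this
      rw [this, pvFrec, hst']

lemma pv_A_spec :
    ∀ (rest : List Int) (prev : Int) (acc : List Int) (seq : Option Int),
      pvFinA (pvFrec prev (acc, seq) rest)
        = acc ++ pvSrec prev (seq.getD prev) seq.isSome rest := by
  intro rest
  induction rest with
  | nil =>
      intro prev acc seq
      cases seq <;> simp [pvFrec, pvFinA, pvSrec]
  | cons x xs ih =>
      intro prev acc seq
      by_cases hx : x = prev + 1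
      · cases seq with
        | none => simp [pvFrec, hx, pvSrec, ih]
        | some h => simp [pvFrec, hx, pvSrec, ih]
      · cases seq with
        | none => simp [pvFrec, hx, pvSrec, ih]
        | some h => simp [pvFrec, hx, pvSrec, ih x (acc ++ [h + 5]) none]

lemma pv_B_spec :
    ∀ (rest : List Int) (runs : List (List Int)) (cur : List Int) (last : Int),
      cur.getLast? = some last →
      pvOutB (List.foldl pvStepB (runs, cur) rest)
        = (runs.filter (fun r => 2 ≤ r.length)).map (fun r => r.headD 0 + 5)
          ++ pvSrec last (cur.headD 0) (decide (2 ≤ cur.length)) rest := by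
  intro rest
  induction rest with
  | nil =>
      intro runs cur last hlast
      have hne : cur ≠ [] := by intro h; simp [h] at hlast
      by_cases h2 : 2 ≤ cur.length <;>
        simp [pvOutB, hne, pvSrec, List.filter_append, h2]
  | cons x xs ih =>
      intro runs cur last hlast
      have hne : cur ≠ [] := by intro h; simp [h] at hlast
      have hcur1 : 1 ≤ cur.length := by
        cases cur with
        | nil => exact absurd rfl hne
        | cons a as => simp
      rw [List.foldl_cons]
      by_cases hx : x = last + 1
      · have hstep : pvStepB (runs, cur) x = (runs, cur ++ [x]) := by
          simp [pvStepB, hlast, hx]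
        rw [hstep]
        have hlast' : (cur ++ [x]).getLast? = some x := by simp
        rw [ih runs (cur ++ [x]) x hlast']
        have hbig' : decide (2 ≤ (cur ++ [x]).length) = true := by
          simp; omega
        rw [hbig']
        have hhead : (cur ++ [x]).headD 0
            = if decide (2 ≤ cur.length) then cur.headD 0 else last := by
          by_cases h2 : 2 ≤ cur.length
          · simp [h2]
            cases cur with
            | nil => exact absurd rfl hne
            | cons a as => simp
          · have hlen1 : cur.length = 1 := by omega
            have : cur = [last] := by
              cases cur with
              | nil => exact absurd rfl hne
              | cons a as =>
                  cases as with
                  | nil => simpa using hlast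
                  | cons b bs => simp at hlen1
            simp [this]
        rw [hhead]
        simp [pvSrec, hx]
      · have hstep : pvStepB (runs, cur) x = (runs ++ [cur], [x]) := by
          simp [pvStepB, hlast, hx]
        rw [hstep]
        rw [ih (runs ++ [cur]) [x] x (by simp)]
        simp only [List.filter_append, List.map_append]
        conv_rhs => rw [pvSrec]
        rw [if_neg hx]
        by_cases h2 : 2 ≤ cur.length <;> simp [h2, List.append_assoc]

-- ===== VERDICT (by name: the statement is the Claim_ definition above) =====
theorem analyze_storm_shrinking_spec : Claim_equal_analyze_storm_shrinking := by
  intro l _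
  unfold Spec_analyze_storm_shrinking
  cases l with
  | nil => rfl
  | cons p rest =>
      show analyze_storm_shrinking (p :: rest) = analyze_storm_shrinking_alt (p :: rest)
      have hA : analyze_storm_shrinking (p :: rest) = pvFinA (pvFrec p ([], none) rest) := by
        unfold analyze_storm_shrinking
        rw [if_neg (by simp)]
        have h := pv_idx_fold (p :: rest) rest [] p ([], none) (by simp)
        simp only [List.length_nil, Nat.cast_zero, zero_add] at h
        rw [h]
        rfl
      have hB : analyze_storm_shrinking_alt (p :: rest)
          = pvOutB (List.foldl pvStepB ([], [p]) rest) := by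
        unfold analyze_storm_shrinking_alt
        rw [List.foldl_cons]
        rfl
      rw [hA, hB]
      rw [pv_B_spec rest [] [p] p (by simp)]
      rw [pv_A_spec rest p [] none]
      rfl
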